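-- pv_equiv track=rewrite | github.com/AswinBlue/acmicpc | 1019/main.py | init_Q
-- ===== SOURCE A (Python) =====
-- def init_Q(x):
--     Q = [[0 for _ in range(2)] for _ in range(x+1)] # x by 10 짜리 2차원 배열
--     for i in range(1, x+1):
--         for j in range(2):
--             if j == 0:
--                 for k in range(i-1):
--                     Q[i][j] += (10**(i-2-k) * (10**(k+1) -1))
--             else:
--                 Q[i][j] = Q[i-1][j] * 10 + 10**(i-1)
--     return Q
-- ===== SOURCE B (Python) =====
-- def init_Q(x):
--     # One pass with closed forms: row i is [(i-1)*10^(i-1) - (10^(i-1)-1)//9, i*10^(i-1)],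
--     # with the power of ten maintained incrementally.
--     Q = []
--     p = 1  # 10**(i-1) for the current i >= 1
--     for i in range(x + 1):
--         if i == 0:
--             Q.append([0, 0])
--         else:
--             Q.append([(i - 1) * p - (p - 1) // 9, i * p])
--             p *= 10
--     return Q
-- ===== Notes on version B (the rewrite author's own statement) =====
-- stated objective: faster
-- what changed: Replaces A's nested loops (an inner loop recomputing a geometric sum for every row of a preallocated table it mutates in place) by a single pass that appends each row directly from closed-form expressions (a multiple of a power of ten minus a repunit), with the power of ten maintained incrementally.
import Mathlib
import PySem

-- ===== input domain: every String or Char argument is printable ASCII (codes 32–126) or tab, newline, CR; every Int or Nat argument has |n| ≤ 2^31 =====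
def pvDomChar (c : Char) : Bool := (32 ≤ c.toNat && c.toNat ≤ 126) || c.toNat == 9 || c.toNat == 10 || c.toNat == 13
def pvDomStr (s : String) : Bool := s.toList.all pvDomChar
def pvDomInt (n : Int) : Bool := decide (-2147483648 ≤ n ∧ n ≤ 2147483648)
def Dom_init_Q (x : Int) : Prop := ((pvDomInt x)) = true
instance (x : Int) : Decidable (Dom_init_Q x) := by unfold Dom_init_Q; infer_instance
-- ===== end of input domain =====

-- B replaces A's O(x^2)-term double loop by one pass with a closed-form value per row
-- (objective: faster, asymptotically fewer bignum operations).

-- ===== PORT A =====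
-- literal transliteration of A; the '.toNat' on the exponents is exact because every
-- exponent reached by the loops is nonnegative (k ranges over range(i-1), so i-2-k ≥ 0).
def init_Q (x : Int) : List (List Int) :=
  let Q0 := (PySem.List.pyRange 0 (x+1) 1).map
    (fun _ => (PySem.List.pyRange 0 2 1).map (fun _ => (0 : Int)))
  (PySem.List.pyRange 1 (x+1) 1).foldl (fun Q i =>
    (PySem.List.pyRange 0 2 1).foldl (fun Q j =>
      if j == 0 then
        (PySem.List.pyRange 0 (i-1) 1).foldl (fun Q k =>
          PySem.List.pySetD Q i (PySem.List.pySetD (PySem.List.pyGetD Q i []) j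
            (PySem.List.pyGetD (PySem.List.pyGetD Q i []) j 0
              + 10 ^ (i-2-k).toNat * (10 ^ (k+1).toNat - 1)))) Q
      else
        PySem.List.pySetD Q i (PySem.List.pySetD (PySem.List.pyGetD Q i []) j
          (PySem.List.pyGetD (PySem.List.pyGetD Q (i-1) []) j 0 * 10
            + 10 ^ (i-1).toNat))) Q) Q0

-- ===== PORT B =====
-- transliteration of Source B: one fold carrying (rows so far, running power 10^(i-1))
def init_Q_alt (x : Int) : List (List Int) :=
  ((PySem.List.pyRange 0 (x+1) 1).foldl (fun (s : List (List Int) × Int) i =>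
      if i == 0 then (s.1 ++ [[0, 0]], s.2)
      else (s.1 ++ [[(i-1) * s.2 - PySem.Int.floordiv (s.2 - 1) 9, i * s.2]], s.2 * 10))
    ([], 1)).1

-- ===== PRECONDITION & SPEC =====
def Spec_init_Q (x : Int) (out : List (List Int)) : Prop := out = init_Q_alt x
instance (x : Int) (out : List (List Int)) : Decidable (Spec_init_Q x out) := by unfold Spec_init_Q; infer_instance

-- ===== CLAIM (what is proved, stated in full; the proofs are below) =====
def Claim_equal_init_Q : Prop := ∀ (x : Int), Dom_init_Q x → Spec_init_Q x (init_Q x)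

-- ===== LEMMAS AND PROOFS =====

-- the repunit (10^n - 1)/9, defined recursively
def pvGeo : Nat → Int
  | 0 => 0
  | n+1 => pvGeo n * 10 + 1

-- row i of the finished table
def pvRow (i : Nat) : List Int :=
  if i = 0 then [0, 0]
  else [((i : Int) - 1) * 10 ^ (i-1) - pvGeo (i-1), (i : Int) * 10 ^ (i-1)]

-- table of n rows in which the first m rows are finished
def pvTab (n m : Nat) : List (List Int) :=
  (List.range n).map (fun t => if t < m then pvRow t else [0, 0])

lemma pvGeo_nine (n : Nat) : 9 * pvGeo n = 10 ^ n - 1 := by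
  induction n with
  | zero => simp [pvGeo]
  | succ n ih => simp [pvGeo, pow_succ]; ring_nf; ring_nf at ih; omega

lemma pvGeo_floordiv (n : Nat) : PySem.Int.floordiv ((10:Int) ^ n - 1) 9 = pvGeo n := by
  rw [PySem.Int.floordiv_eq_ediv_of_pos (by norm_num), ← pvGeo_nine n]
  exact Int.mul_ediv_cancel_left _ (by norm_num)

-- a List.set at one index of a map over range, as a map over range
lemma pvSetMapRange (n m : Nat) (f : Nat → List Int) (v : List Int) :
    ((List.range n).map f).set m v
      = (List.range n).map (fun t => if t = m then v else f t) := by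
  apply List.ext_getElem (by simp)
  intro k h1 h2
  simp only [List.getElem_set, List.getElem_map, List.getElem_range]
  simp at h1
  split_ifs with h h' h'
  · rfl
  · omega
  · omega
  · rfl

lemma pvSetSelf (Q : List (List Int)) (i : Nat) (v : List Int) (h : Q[i]? = some v) :
    Q.set i v = Q := by
  apply List.ext_getElem (by simp)
  intro k h1 h2
  rw [List.getElem_set]
  split
  · next he => subst he; rw [List.getElem?_eq_getElem h2] at h; exact (Option.some.inj h).symm
  · rfl

-- the inner '+=' loop accumulates a sum into position (i, 0)
lemma pvKFold (t : Int → Int) (ks : List Int) :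
    ∀ (Q : List (List Int)) (i : Nat) (a : Int) (r : List Int), Q.getD i [] = a :: r →
    ks.foldl (fun Q k => Q.set i ((Q.getD i []).set 0 ((Q.getD i []).getD 0 0 + t k))) Q
      = Q.set i ((a + (ks.map t).sum) :: r) := by
  induction ks with
  | nil =>
    intro Q i a r h
    simp only [List.foldl_nil, List.map_nil, List.sum_nil, add_zero]
    by_cases hi : i < Q.length
    · refine (pvSetSelf Q i _ ?_).symm
      rw [List.getElem?_eq_getElem hi]
      rw [List.getD_eq_getElem?_getD, List.getElem?_eq_getElem hi] at h
      simp at h; rw [h]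
    · rw [List.set_eq_of_length_le (by omega)]
  | cons k ks ih =>
    intro Q i a r h
    have hi : i < Q.length := by
      by_contra hle
      rw [List.getD_eq_getElem?_getD, List.getElem?_eq_none (by omega)] at h
      simp at h
    simp only [List.foldl_cons, h]
    have h2 : (Q.set i ((a :: r).set 0 ((a :: r).getD 0 0 + t k))).getD i [] = (a + t k) :: r := by
      simp [List.getD_eq_getElem?_getD, hi]
    rw [ih _ i (a + t k) r h2]
    simp [List.set_set, add_assoc]

-- closed form of the inner sum
lemma pvSum (d : Nat) :
    ((List.range d).map (fun k => (10:Int) ^ (d-1-k) * (10 ^ (k+1) - 1))).sum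
      = (d : Int) * 10 ^ d - pvGeo d := by
  induction d with
  | zero => simp [pvGeo]
  | succ d ih =>
    rw [List.range_succ, List.map_append, List.sum_append]
    have hcongr : (List.range d).map (fun k => (10:Int) ^ (d+1-1-k) * (10 ^ (k+1) - 1))
        = (List.range d).map (fun k => 10 * ((10:Int) ^ (d-1-k) * (10 ^ (k+1) - 1))) := by
      apply List.map_congr_left
      intro k hk
      rw [List.mem_range] at hk
      have : d + 1 - 1 - k = (d - 1 - k) + 1 := by omega
      rw [this, pow_succ]; ring
    rw [hcongr, PySem.List.sum_map_const_mul_int, ih]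
    have hd0 : d + 1 - 1 - d = 0 := by omega
    simp only [List.map_cons, List.map_nil, List.sum_cons, List.sum_nil, hd0, pow_zero, one_mul,
      add_zero, pvGeo]
    push_cast
    ring

-- B's fold over indices 0..n-1
lemma pvBInv (n : Nat) :
    ((List.range n).map (fun k : Nat => (k:Int))).foldl
      (fun (s : List (List Int) × Int) i =>
        if i == 0 then (s.1 ++ [[0, 0]], s.2)
        else (s.1 ++ [[(i-1) * s.2 - PySem.Int.floordiv (s.2 - 1) 9, i * s.2]], s.2 * 10))
      ([], 1)
    = ((List.range n).map pvRow, 10 ^ (n-1)) := by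
  induction n with
  | zero => simp
  | succ n ih =>
    rw [List.range_succ, List.map_append, List.foldl_append, ih]
    simp only [List.map_append]
    simp only [List.map_cons, List.map_nil, List.foldl_cons, List.foldl_nil]
    by_cases hn : n = 0
    · subst hn; simp [pvRow]
    · have hbeq : ((n : Int) == 0) = false := by
        simp; exact_mod_cast hn
      rw [hbeq]
      simp only [Bool.false_eq_true, if_false, Prod.mk.injEq]
      refine ⟨?_, ?_⟩
      · congr 1
        simp only [pvRow, hn, if_false]
        rw [pvGeo_floordiv (n-1)]
      · have h : n - 1 + 1 = n + 1 - 1 := by omega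
        rw [← pow_succ, h]

-- the j-loop body at index m turns the table with m finished rows into m+1 finished rows
lemma pvAStep (n m : Nat) (hm1 : 1 ≤ m) (hmn : m < n) :
    (PySem.List.pyRange 0 2 1).foldl (fun Q j =>
      if j == 0 then
        (PySem.List.pyRange 0 ((m:Int)-1) 1).foldl (fun Q k =>
          PySem.List.pySetD Q (m:Int) (PySem.List.pySetD (PySem.List.pyGetD Q (m:Int) []) j
            (PySem.List.pyGetD (PySem.List.pyGetD Q (m:Int) []) j 0
              + 10 ^ ((m:Int)-2-k).toNat * (10 ^ (k+1).toNat - 1)))) Q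
      else
        PySem.List.pySetD Q (m:Int) (PySem.List.pySetD (PySem.List.pyGetD Q (m:Int) []) j
          (PySem.List.pyGetD (PySem.List.pyGetD Q ((m:Int)-1) []) j 0 * 10
            + 10 ^ ((m:Int)-1).toNat))) (pvTab n m)
    = pvTab n (m+1) := by
  have hlen : (pvTab n m).length = n := by simp [pvTab]
  have hrow : (pvTab n m).getD m [] = [0, 0] := by
    rw [pvTab, PySem.List.getD_map_range _ n m [] hmn]
    simp
  have hpy2 : PySem.List.pyRange 0 2 1 = [0, 1] := by decide
  rw [hpy2]
  simp only [List.foldl_cons, List.foldl_nil]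
  have hbeq0 : ((0:Int) == 0) = true := by decide
  have hbeq1 : ((1:Int) == 0) = false := by decide
  rw [hbeq0, hbeq1]
  simp only [if_true, Bool.false_eq_true, if_false]
  -- normalise the PySem index operations to List.set / List.getD (indices are the casts ↑m, ↑m-1 and the literals 0, 1)
  simp only [PySem.List.pySetD_natCast, PySem.List.pyGetD_natCast,
    PySem.List.pySetD_of_nonneg _ _ (by norm_num : (0:Int) ≤ 0),
    PySem.List.pySetD_of_nonneg _ _ (by norm_num : (0:Int) ≤ 1),
    PySem.List.pyGetD_zero, Int.toNat_zero, Int.toNat_one]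
  have hc : ((m:Int) - 1) = ((m - 1 : Nat) : Int) := by omega
  -- the k-loop accumulates the sum of its terms into entry (m, 0)
  rw [pvKFold (fun k => 10 ^ ((m:Int) - 2 - k).toNat * (10 ^ (k+1).toNat - 1))
        (PySem.List.pyRange 0 ((m:Int) - 1) 1) (pvTab n m) m 0 [0] hrow]
  -- the accumulated sum, in closed form
  have hS : ((PySem.List.pyRange 0 ((m:Int) - 1) 1).map
        (fun k => (10:Int) ^ ((m:Int) - 2 - k).toNat * (10 ^ (k+1).toNat - 1))).sum
      = ((m:Int) - 1) * 10 ^ (m-1) - pvGeo (m-1) := by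
    rw [hc, PySem.List.pyRange_zero_nat, List.map_map]
    rw [List.map_congr_left (l := List.range (m-1))
      (g := fun k : Nat => (10:Int) ^ (m-1-1-k) * (10 ^ (k+1) - 1)) ?_]
    · rw [pvSum (m-1)]
    · intro k hk
      rw [List.mem_range] at hk
      have e1 : ((m:Int) - 2 - (k:Int)).toNat = m - 1 - 1 - k := by omega
      have e2 : (((k:Nat):Int) + 1).toNat = k + 1 := by omega
      simp only [Function.comp_apply, e1, e2]
  rw [hS]
  set am : Int := 0 + (((m:Int) - 1) * 10 ^ (m-1) - pvGeo (m-1)) with ham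
  have hQ1len : ((pvTab n m).set m (am :: [0])).length = n := by simp [hlen]
  have hQ1m : ((pvTab n m).set m (am :: [0])).getD m [] = am :: [0] := by
    simp [List.getD_eq_getElem?_getD, hlen, hmn]
  have hQ1m1 : ((pvTab n m).set m (am :: [0])).getD (m-1) [] = pvRow (m-1) := by
    have hne : m ≠ m - 1 := by omega
    simp only [List.getD_eq_getElem?_getD, List.getElem?_set, if_neg hne]
    rw [pvTab, List.getElem?_map, List.getElem?_range (by omega)]
    simp [show m - 1 < m by omega]
  rw [hc, PySem.List.pyGetD_natCast, hQ1m1, hQ1m]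
  -- the second column's value is m * 10^(m-1)
  have hb : PySem.List.pyGetD (pvRow (m-1)) 1 0 * 10 + 10 ^ (((m - 1 : Nat) : Int)).toNat
      = (m:Int) * 10 ^ (m-1) := by
    have he : (((m - 1 : Nat) : Int)).toNat = m - 1 := by omega
    rw [he]
    by_cases hm : m = 1
    · subst hm; simp [pvRow]; decide
    · have h2 : 2 ≤ m := by omega
      simp only [pvRow, show m - 1 ≠ 0 by omega, if_false]
      simp only [pysem]
      simp only [List.getD_cons_succ, List.getD_cons_zero]
      have e : m - 1 - 1 + 1 = m - 1 := by omega
      rw [mul_assoc, ← pow_succ, e]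
      have ec : ((m - 1 : Nat) : Int) = (m:Int) - 1 := by omega
      rw [ec]; ring
  rw [hb, List.set_set]
  have hrowm : (am :: [0]).set 1 ((m:Int) * 10 ^ (m-1)) = pvRow m := by
    simp [pvRow, show m ≠ 0 by omega, ham]
  rw [hrowm, pvTab, pvSetMapRange]
  rw [pvTab]
  apply List.map_congr_left
  intro t ht
  rw [List.mem_range] at ht
  split_ifs with h1 h2 h3 <;> first | rfl | (subst h1; rfl) | omega

-- A's fold over the outer indices 1..m-1
lemma pvAInv (n : Nat) : ∀ m : Nat, m ≤ n →
    (PySem.List.pyRange 1 (m:Int) 1).foldl (fun Q i =>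
      (PySem.List.pyRange 0 2 1).foldl (fun Q j =>
        if j == 0 then
          (PySem.List.pyRange 0 (i-1) 1).foldl (fun Q k =>
            PySem.List.pySetD Q i (PySem.List.pySetD (PySem.List.pyGetD Q i []) j
              (PySem.List.pyGetD (PySem.List.pyGetD Q i []) j 0
                + 10 ^ (i-2-k).toNat * (10 ^ (k+1).toNat - 1)))) Q
        else
          PySem.List.pySetD Q i (PySem.List.pySetD (PySem.List.pyGetD Q i []) j
            (PySem.List.pyGetD (PySem.List.pyGetD Q (i-1) []) j 0 * 10
              + 10 ^ (i-1).toNat))) Q) (pvTab n 0)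
    = pvTab n m := by
  intro m
  induction m with
  | zero =>
    intro _
    rw [show ((0:Nat):Int) = 0 by norm_num, PySem.List.pyRange_one_eq_nil (by norm_num : (0:Int) ≤ 1)]
    rfl
  | succ m ih =>
    intro hmn
    by_cases hm : m = 0
    · subst hm
      rw [show ((0+1:Nat):Int) = 1 by norm_num, PySem.List.pyRange_one_eq_nil le_rfl]
      rw [show ((0:Nat):Int) = 0 by norm_num, PySem.List.pyRange_one_eq_nil (by norm_num : (0:Int) ≤ 1)] at ih
      simp only [List.foldl_nil, pvTab]
      apply List.map_congr_left
      intro t _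
      split_ifs with h1 h2 <;> first | omega | rfl | simp [show t = 0 by omega, pvRow]
    · have h1m : (1:Int) ≤ (m:Nat) := by exact_mod_cast Nat.one_le_iff_ne_zero.mpr hm
      have : ((m+1 : Nat) : Int) = (m:Int) + 1 := by push_cast; ring
      rw [this, PySem.List.pyRange_one_succ_right h1m, List.foldl_append, ih (by omega)]
      simp only [List.foldl_cons, List.foldl_nil]
      exact pvAStep n m (by omega) (by omega)

lemma pvTab_full (n : Nat) : pvTab n n = (List.range n).map pvRow := by
  apply List.map_congr_left
  intro t ht
  rw [List.mem_range] at ht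
  simp [ht]

-- ===== VERDICT (by name: the statement is the Claim_ definition above) =====
theorem init_Q_spec : Claim_equal_init_Q := by
  intro x _
  show init_Q x = init_Q_alt x
  have hn : ∃ n : Nat, PySem.List.pyRange 0 (x+1) 1 = (List.range n).map (fun k : Nat => (k:Int))
      ∧ PySem.List.pyRange 1 (x+1) 1 = PySem.List.pyRange 1 (n:Int) 1 := by
    refine ⟨(x+1).toNat, PySem.List.pyRange_zero (x+1), ?_⟩
    by_cases h : 0 ≤ x + 1
    · congr 1; omega
    · rw [PySem.List.pyRange_one_eq_nil (by omega), PySem.List.pyRange_one_eq_nil (by omega)]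
  obtain ⟨n, h0, h1⟩ := hn
  have hQ0 : (PySem.List.pyRange 0 (x+1) 1).map
      (fun _ => (PySem.List.pyRange 0 2 1).map (fun _ => (0:Int))) = pvTab n 0 := by
    rw [h0, List.map_map, pvTab]
    apply List.map_congr_left
    intro t _
    simp
  rw [init_Q, init_Q_alt, hQ0, h1, pvAInv n n le_rfl, pvTab_full, h0, pvBInv n]
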